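-- pv_equiv track=rewrite | github.com/tonto98/Advent-Of-Code-2019 | DAY 04/day04.py | performCheck
-- ===== SOURCE A (Python) =====
-- from collections import defaultdict
--
-- def performCheck(num):
--     repeatCnt = defaultdict(int)
--     decreases = False
--
--     for i in range(len(num)):
--         if i > 0 and num[i] == num[i - 1]:
--             repeatCnt[num[i]] += 1
--         if i > 0 and num[i] < num[i - 1]:
--             decreases = True
--     return repeatCnt, decreases
-- ===== SOURCE B (Python) =====
-- from collections import defaultdict
--
-- def performCheck(num):
--     # runs-based decomposition: walk maximal runs of equal chars, add (run-1)
--     # per run; detect decreases with an independent adjacent-pair scan.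
--     repeatCnt = defaultdict(int)
--     i, n = 0, len(num)
--     while i < n:
--         j = i
--         while j < n and num[j] == num[i]:
--             j += 1
--         if j - i >= 2:
--             repeatCnt[num[i]] += j - i - 1
--         i = j
--     decreases = any(a > b for a, b in zip(num, num[1:]))
--     return repeatCnt, decreases
-- ===== Notes on version B (the rewrite author's own statement) =====
-- stated objective: alternative
-- what changed: Replaced the single index loop that bumps the count by 1 at every adjacent equal pair with a runs-based scan (each maximal run of length L adds L-1 once) plus an independent adjacent-pair any() scan for the decrease flag.
import Mathlib
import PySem

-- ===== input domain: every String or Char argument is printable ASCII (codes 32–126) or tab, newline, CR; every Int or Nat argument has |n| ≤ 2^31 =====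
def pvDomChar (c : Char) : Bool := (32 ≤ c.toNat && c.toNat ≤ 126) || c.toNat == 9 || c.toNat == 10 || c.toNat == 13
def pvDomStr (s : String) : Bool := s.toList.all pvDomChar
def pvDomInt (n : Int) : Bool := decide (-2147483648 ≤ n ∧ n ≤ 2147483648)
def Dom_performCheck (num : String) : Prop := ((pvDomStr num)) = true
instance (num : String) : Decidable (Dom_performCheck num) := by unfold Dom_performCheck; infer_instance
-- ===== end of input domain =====

-- B restructures A's single index loop into a runs-based scan (each maximal run of
-- length L adds L-1 to its character's count once) plus an independent adjacent-pair
-- scan for the decrease flag; same outputs, no speed claim.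

-- ===== PORT A =====
-- A: one loop over indices; every adjacent equal pair bumps the per-char counter by 1
-- (defaultdict(int): repeatCnt[c] += 1 is Dict.modify c 0 (·+1)); num[i] < num[i-1]
-- sets the flag.  Indices i and i-1 are always in range when read (i > 0 is checked
-- first), so getD's default is never used — exact.
def performCheck (num : String) : (List (String × Int)) × Bool :=
  let cs := num.toList
  let st := (List.range cs.length).foldl
    (fun (st : PySem.Dict String Int × Bool) i =>
      (if 0 < i ∧ cs.getD i 'a' = cs.getD (i - 1) 'a'
         then st.1.modify (String.ofList [cs.getD i 'a']) 0 (· + 1) else st.1,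
       if 0 < i ∧ cs.getD i 'a' < cs.getD (i - 1) 'a' then true else st.2))
    (PySem.Dict.empty, false)
  (st.1.items, st.2)

-- ===== PORT B =====
-- B's outer while loop walks maximal runs: the inner `while j < n and num[j] == num[i]`
-- scan is takeWhile (run length) / dropWhile (rest of the string).
def pyRuns : List Char → List (Char × Nat)
  | [] => []
  | c :: rest =>
      (c, (rest.takeWhile (· == c)).length + 1) :: pyRuns (rest.dropWhile (· == c))
termination_by l => l.length
decreasing_by
  simpa using Nat.lt_succ_of_le (List.length_dropWhile_le _ _)

def performCheck_alt (num : String) : (List (String × Int)) × Bool :=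
  let cs := num.toList
  let d := (pyRuns cs).foldl
    (fun (d : PySem.Dict String Int) r =>
      if 2 ≤ r.2 then d.modify (String.ofList [r.1]) 0 (· + ((r.2 : Int) - 1)) else d)
    PySem.Dict.empty
  (d.items, (cs.zip cs.tail).any (fun p => p.1 > p.2))

-- ===== PRECONDITION & SPEC =====
def Spec_performCheck (num : String) (out : (List (String × Int)) × Bool) : Prop := out = performCheck_alt num
instance (num : String) (out : (List (String × Int)) × Bool) : Decidable (Spec_performCheck num out) := by unfold Spec_performCheck; infer_instance

-- ===== CLAIM (what is proved, stated in full; the proofs are below) =====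
def Claim_equal_performCheck : Prop := ∀ (num : String), Dom_performCheck num → Spec_performCheck num (performCheck num)

-- ===== LEMMAS AND PROOFS =====

-- two += on the same key compose
theorem modify_modify_add (d : PySem.Dict String Int) (k : String) (a b : Int) :
    (d.modify k 0 (· + a)).modify k 0 (· + b) = d.modify k 0 (· + (a + b)) := by
  simp [PySem.Dict.modify, PySem.Dict.getD_insert_self, PySem.Dict.insert_insert_self, add_assoc]

-- A's per-pair step and B's decrease test, named for the lemmas
def stepA (d : PySem.Dict String Int) (p : Char × Char) : PySem.Dict String Int :=
  if p.2 = p.1 then d.modify (String.ofList [p.2]) 0 (· + 1) else d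

-- A's index loop over range(len cs), guarded by i > 0, is a fold over adjacent pairs
theorem zip_tail_eq_map_range (cs : List Char) :
    cs.zip cs.tail = (List.range (cs.length - 1)).map (fun i => (cs.getD i 'a', cs.getD (i + 1) 'a')) := by
  apply List.ext_getElem
  · simp [List.length_zip, List.length_tail]
  · intro i h1 h2
    simp only [List.length_zip, List.length_tail] at h1
    have hi : i + 1 < cs.length := by omega
    simp [List.getElem_zip, List.getElem_map, List.getElem_tail,
      List.getD_eq_getElem?_getD, List.getElem?_eq_getElem (by omega : i < cs.length),
      List.getElem?_eq_getElem hi]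

theorem foldl_range_adj {β : Type} (F : β → Char × Char → β) (cs : List Char) (b : β) :
    (List.range cs.length).foldl
      (fun acc i => if 0 < i then F acc (cs.getD (i - 1) 'a', cs.getD i 'a') else acc) b
    = (cs.zip cs.tail).foldl F b := by
  cases cs with
  | nil => simp
  | cons c rest =>
    rw [zip_tail_eq_map_range, List.foldl_map]
    simp only [List.length_cons, Nat.add_sub_cancel, List.range_succ_eq_map, List.foldl_cons,
      List.foldl_map]
    simp

-- a run of n repeat-pairs of c equals one += n
theorem foldl_stepA_replicate (n : Nat) (c : Char) (d : PySem.Dict String Int) :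
    (List.replicate n ((c, c) : Char × Char)).foldl stepA d
    = if n = 0 then d else d.modify (String.ofList [c]) 0 (· + (n : Int)) := by
  induction n generalizing d with
  | zero => simp
  | succ n ih =>
    rw [List.replicate_succ, List.foldl_cons]
    have h1 : stepA d (c, c) = d.modify (String.ofList [c]) 0 (· + 1) := by simp [stepA]
    rw [h1, ih]
    by_cases hn : n = 0
    · simp [hn]
    · rw [if_neg hn, if_neg (Nat.succ_ne_zero n), modify_modify_add]
      have hcast : (1 : Int) + (n : Int) = ((n + 1 : Nat) : Int) := by push_cast; ring
      rw [hcast]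

theorem adj_replicate (n : Nat) (c : Char) (r : List Char) :
    ((c :: (List.replicate n c ++ r)).zip (List.replicate n c ++ r))
    = List.replicate n ((c, c) : Char × Char) ++ ((c :: r).zip r) := by
  induction n with
  | zero => simp
  | succ n ih => simp [List.replicate_succ, List.zip_cons_cons, ih]

theorem dropWhile_head_ne (p : Char → Bool) (l : List Char) (x : Char) (r : List Char)
    (h : l.dropWhile p = x :: r) : p x = false := by
  induction l with
  | nil => simp at h
  | cons a l ih =>
    rw [List.dropWhile_cons] at h
    by_cases hp : p a
    · exact ih (by simpa [hp] using h)
    · simp [hp] at h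
      simp [← h.1]; simpa using hp

-- the heart: fold of A's per-pair step over adjacent pairs = B's runs fold
theorem adj_eq_runs (cs : List Char) :
    ∀ d : PySem.Dict String Int,
      (cs.zip cs.tail).foldl stepA d
      = (pyRuns cs).foldl
          (fun (d : PySem.Dict String Int) r =>
            if 2 ≤ r.2 then d.modify (String.ofList [r.1]) 0 (· + ((r.2 : Int) - 1)) else d) d := by
  induction cs using pyRuns.induct with
  | case1 => intro d; simp [pyRuns]
  | case2 c rest ih =>
    intro d
    have ht : rest.takeWhile (· == c) = List.replicate (rest.takeWhile (· == c)).length c := by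
      apply List.eq_replicate_iff.mpr
      refine ⟨rfl, fun b hb => ?_⟩
      have := List.takeWhile_subset (p := (· == c)) hb
      have hpb : (b == c) = true := by
        have := List.mem_takeWhile_imp hb
        exact this
      simpa using hpb
    have hsplit : rest = rest.takeWhile (· == c) ++ rest.dropWhile (· == c) :=
      (List.takeWhile_append_dropWhile).symm
    set n := (rest.takeWhile (· == c)).length with hn
    set r := rest.dropWhile (· == c) with hr
    -- LHS: decompose the adjacent pairs
    have hzip : ((c :: rest).zip (c :: rest).tail)
        = List.replicate n ((c, c) : Char × Char) ++ ((c :: r).zip r) := by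
      conv_lhs => rw [List.tail_cons, hsplit, ht]
      exact adj_replicate n c r
    rw [hzip, List.foldl_append, foldl_stepA_replicate]
    -- RHS: one run step, then recurse
    rw [pyRuns]
    simp only [List.foldl_cons]
    have hstep :
        (if 2 ≤ n + 1 then d.modify (String.ofList [c]) 0 (· + (((n + 1 : Nat) : Int) - 1)) else d)
        = if n = 0 then d else d.modify (String.ofList [c]) 0 (· + (n : Int)) := by
      by_cases hn0 : n = 0
      · simp [hn0]
      · have h2 : 2 ≤ n + 1 := by omega
        have hcast : ((n + 1 : Nat) : Int) - 1 = (n : Int) := by push_cast; ring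
        rw [if_pos h2, if_neg hn0, hcast]
    rw [← hstep]
    -- remaining pairs on the left: the boundary pair (c, head r) is a no-op
    have hrest :
        ∀ d' : PySem.Dict String Int,
          (((c :: r).zip r)).foldl stepA d' = (r.zip r.tail).foldl stepA d' := by
      intro d'
      cases hrr : r with
      | nil => simp
      | cons x r' =>
        have hne : (x == c) = false := dropWhile_head_ne _ rest x r' (by rw [← hr, hrr])
        have hxc : ¬ (x = c) := by simpa using hne
        simp [List.zip_cons_cons, stepA, hxc]
    rw [hrest]
    exact ih _

-- ===== VERDICT (by name: the statement is the Claim_ definition above) =====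
theorem performCheck_spec : Claim_equal_performCheck := by
  intro num _
  unfold Spec_performCheck performCheck performCheck_alt
  set cs := num.toList with hcs
  simp only
  rw [PySem.List.foldl_prod_mk
    (f := fun (d : PySem.Dict String Int) i =>
      if 0 < i ∧ cs.getD i 'a' = cs.getD (i - 1) 'a'
      then d.modify (String.ofList [cs.getD i 'a']) 0 (· + 1) else d)
    (g := fun (b : Bool) i =>
      if 0 < i ∧ cs.getD i 'a' < cs.getD (i - 1) 'a' then true else b)]
  refine Prod.ext ?_ ?_
  · -- dict component
    simp only
    have hf : (fun (d : PySem.Dict String Int) i =>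
        if 0 < i ∧ cs.getD i 'a' = cs.getD (i - 1) 'a'
        then d.modify (String.ofList [cs.getD i 'a']) 0 (· + 1) else d)
      = (fun acc i => if 0 < i then stepA acc (cs.getD (i - 1) 'a', cs.getD i 'a') else acc) := by
      funext d i
      by_cases h0 : 0 < i
      · simp [h0, stepA]
      · simp [h0]
    rw [hf, foldl_range_adj, adj_eq_runs]
  · -- bool component
    simp only
    have hg : (fun (b : Bool) i =>
        if 0 < i ∧ cs.getD i 'a' < cs.getD (i - 1) 'a' then true else b)
      = (fun acc i => if 0 < i then
          (if decide (cs.getD i 'a' < cs.getD (i - 1) 'a') = true then true else acc) else acc) := by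
      funext b i
      by_cases h0 : 0 < i
      · simp [h0]
      · simp [h0]
    rw [hg,
      foldl_range_adj (F := fun (b : Bool) (p : Char × Char) => if decide (p.2 < p.1) = true then true else b),
      PySem.List.foldl_if_true_eq]
    simp [GT.gt]
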